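-- pv_equiv track=rewrite | github.com/AdamOtto/Daily-Challenges | Challenge1497.py | Solution
-- ===== SOURCE A (Python) =====
-- def Solution(d, ar):
--     l = len(d)
--     d1 = {}
--     retVal = []
--     for a in ar:
--         if a not in d1:
--             d1[a] = 0
--         d1[a] += 1
--
--
--     for i in range(l):
--         d2 = {}
--         if len(d[i]) == len(ar) + 1:
--             for j in range(len(d[i])):
--                 if d[i][j] not in d2:
--                     d2[d[i][j]] = 1
--                 else:
--                     d2[d[i][j]] += 1
--             count = 0
--             for key,val in d2.items():
--                 if key in d1:
--                     t = val - d1[key]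
--                     count += t
--                 else:
--                     count += val
--
--             if count == 1:
--                 retVal.append(d[i])
--     return retVal
-- ===== SOURCE B (Python) =====
-- def Solution(d, ar):
--     arset = set(ar)
--     target = len(ar) + 1
--     return [x for x in d if len(x) == target and arset.issubset(x)]
-- ===== Notes on version B (the rewrite author's own statement) =====
-- stated objective: simpler
-- what changed: Replaces the two per-candidate count dictionaries and the signed-difference summation with a single precomputed set of ar and a subset-containment test per candidate (len(x)==len(ar)+1 and set(ar)<=set(x)), eliminating the inner counting and summation loops.
import Mathlib
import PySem

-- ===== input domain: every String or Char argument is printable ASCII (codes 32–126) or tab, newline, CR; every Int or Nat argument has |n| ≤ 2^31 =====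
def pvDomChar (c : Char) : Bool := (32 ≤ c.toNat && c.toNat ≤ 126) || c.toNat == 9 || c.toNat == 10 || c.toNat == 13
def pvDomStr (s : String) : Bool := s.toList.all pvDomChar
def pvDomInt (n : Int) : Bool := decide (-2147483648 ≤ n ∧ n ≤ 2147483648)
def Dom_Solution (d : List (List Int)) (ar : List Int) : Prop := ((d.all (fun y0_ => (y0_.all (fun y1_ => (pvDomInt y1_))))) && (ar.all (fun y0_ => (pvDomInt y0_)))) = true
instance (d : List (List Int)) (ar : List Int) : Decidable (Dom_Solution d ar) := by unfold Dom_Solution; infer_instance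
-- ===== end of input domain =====

-- B drops A's per-candidate count dictionary and signed-difference summation, testing instead
-- len(x) == len(ar)+1 together with set(ar) ⊆ set(x) (objective: simpler).

-- ===== PORT A =====
def Solution (d : List (List Int)) (ar : List Int) : List (List Int) :=
  let l := PySem.List.len d
  let d1 : PySem.Dict Int Int :=
    ar.foldl (fun d1 a =>
      let d1 := if d1.contains a = false then d1.insert a 0 else d1
      d1.insert a (d1.getD a 0 + 1)) PySem.Dict.empty
  let retVal : List (List Int) := []
  (PySem.List.pyRange 0 l).foldl (fun retVal i =>
    let x := PySem.List.pyGetD d i []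
    if PySem.List.len x = PySem.List.len ar + 1 then
      let d2 : PySem.Dict Int Int :=
        (PySem.List.pyRange 0 (PySem.List.len x)).foldl (fun d2 j =>
          let e := PySem.List.pyGetD x j 0
          if d2.contains e = false then d2.insert e 1
          else d2.insert e (d2.getD e 0 + 1)) PySem.Dict.empty
      let count : Int :=
        d2.items.foldl (fun count kv =>
          if d1.contains kv.1 then
            let t := kv.2 - d1.getD kv.1 0
            count + t
          else count + kv.2) 0
      if count = 1 then retVal ++ [x] else retVal
    else retVal) retVal

-- ===== PORT B =====
def Solution_alt (d : List (List Int)) (ar : List Int) : List (List Int) :=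
  let arset := PySem.Set.ofList ar
  let target := PySem.List.len ar + 1
  d.filter (fun x => PySem.List.len x == target && arset.all (fun a => x.contains a))

-- ===== PRECONDITION & SPEC =====
def Spec_Solution (d : List (List Int)) (ar : List Int) (out : List (List Int)) : Prop := out = Solution_alt d ar
instance (d : List (List Int)) (ar : List Int) (out : List (List Int)) : Decidable (Spec_Solution d ar out) := by unfold Spec_Solution; infer_instance

-- ===== CLAIM (what is proved, stated in full; the proofs are below) =====
def Claim_equal_Solution : Prop := ∀ (d : List (List Int)) (ar : List Int), Dom_Solution d ar → Spec_Solution d ar (Solution d ar)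

-- ===== LEMMAS AND PROOFS =====

-- A's d1/d2 loops (setdefault-then-increment and branch-on-membership) both build Counter(xs).
lemma pv_d1_counter (xs : List Int) :
    xs.foldl (fun d1 a =>
      let d1 := if d1.contains a = false then d1.insert a 0 else d1
      d1.insert a (d1.getD a 0 + 1)) PySem.Dict.empty = PySem.Dict.counter xs := by
  rw [show (fun (d1 : PySem.Dict Int Int) (a : Int) =>
      let d1 := if d1.contains a = false then d1.insert a 0 else d1
      d1.insert a (d1.getD a 0 + 1)) =
      (fun (d : PySem.Dict Int Int) (x : Int) => d.insert x (d.getD x 0 + 1)) from ?_]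
  · exact PySem.Dict.foldl_insert_getD_add_one_eq_counter xs
  · funext d a
    by_cases h : d.contains a = false
    · simp only [h, if_true]
      rw [PySem.Dict.getD_insert, if_pos rfl, PySem.Dict.insert_insert_self,
        PySem.Dict.getD_of_not_contains d 0 h]
    · simp [h]

lemma pv_d2_counter (xs : List Int) :
    xs.foldl (fun d2 e =>
      if d2.contains e = false then d2.insert e 1
      else d2.insert e (d2.getD e 0 + 1)) PySem.Dict.empty = PySem.Dict.counter xs := by
  rw [show (fun (d2 : PySem.Dict Int Int) (e : Int) =>
      if d2.contains e = false then d2.insert e 1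
      else d2.insert e (d2.getD e 0 + 1)) =
      (fun (d : PySem.Dict Int Int) (x : Int) => d.insert x (d.getD x 0 + 1)) from ?_]
  · exact PySem.Dict.foldl_insert_getD_add_one_eq_counter xs
  · funext d e
    by_cases h : d.contains e = false
    · rw [if_pos h, PySem.Dict.getD_of_not_contains d 0 h]; norm_num
    · simp [h]

-- sum of ys-multiplicities over a duplicate-free list D counts the elements of ys lying in D
lemma pv_sum_counts (D : List Int) (hD : D.Nodup) (ys : List Int) :
    (D.map (fun k => (ys.count k : Int))).sum = (ys.countP (fun a => D.contains a) : Int) := by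
  induction ys with
  | nil => simp
  | cons a ys ih =>
    have hsingle : (D.map (fun k => if a = k then (1 : Int) else 0)).sum
        = if D.contains a then (1 : Int) else 0 := by
      clear ih
      induction D with
      | nil => simp
      | cons k D ihD =>
        have hk := (List.nodup_cons.mp hD)
        by_cases hak : a = k
        · subst hak
          simp only [List.map_cons, List.sum_cons, List.contains_cons,
            BEq.rfl, Bool.true_or, if_true]
          have : (D.map (fun k => if a = k then (1 : Int) else 0)).sum = 0 := by
            apply List.sum_eq_zero; intro x hx
            simp only [List.mem_map] at hx
            obtain ⟨b, hb, hbx⟩ := hx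
            have : a ≠ b := fun h => hk.1 (h ▸ hb)
            simp [this] at hbx; omega
          omega
        · have := ihD hk.2
          simp only [List.map_cons, List.sum_cons, if_neg hak, List.contains_cons]
          have hak' : (a == k) = false := by simp [hak]
          simp only [hak', Bool.false_or]
          omega
    simp only [List.count_cons, List.countP_cons]
    push_cast
    simp only [List.map_map] at *
    have : (D.map (fun k => ((ys.count k : Int) + if a = k then 1 else 0))).sum
        = (D.map (fun k => (ys.count k : Int))).sum
          + (D.map (fun k => if a = k then (1 : Int) else 0)).sum := by
      rw [← List.sum_map_add]
    have hcast : (D.map (fun k => ((ys.count k : Int) + if (a == k) = true then (1:Int) else 0)))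
        = (D.map (fun k => ((ys.count k : Int) + if a = k then (1:Int) else 0))) := by
      apply List.map_congr_left; intro k _
      by_cases h : a = k <;> simp [h]
    rw [hcast, this, ih, hsingle]

lemma pv_sum_map_sub {a : Type} (l : List a) (f g : a → Int) :
    (l.map (fun x => f x - g x)).sum = (l.map f).sum - (l.map g).sum := by
  induction l with
  | nil => simp
  | cons x l ih => simp only [List.map_cons, List.sum_cons, ih]; ring

-- A's signed-difference summation over Counter(x).items equals |x| − #{a ∈ ar : a ∈ x}
lemma pv_count_eq (x ar : List Int) :
    (PySem.Dict.counter x).items.foldl (fun count kv =>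
      if (PySem.Dict.counter ar).contains kv.1 then
        let t := kv.2 - (PySem.Dict.counter ar).getD kv.1 0
        count + t
      else count + kv.2) 0
    = (x.length : Int) - (ar.countP (fun a => x.contains a) : Int) := by
  have hstep : (fun (count : Int) (kv : Int × Int) =>
      if (PySem.Dict.counter ar).contains kv.1 then
        let t := kv.2 - (PySem.Dict.counter ar).getD kv.1 0
        count + t
      else count + kv.2) =
      (fun (count : Int) (kv : Int × Int) => count + (kv.2 - (ar.count kv.1 : Int))) := by
    funext c kv
    rw [PySem.Dict.contains_counter, PySem.Dict.getD_counter]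
    by_cases h : ar.contains kv.1 = true
    · rw [if_pos h]
    · rw [if_neg h]
      have : ar.count kv.1 = 0 := by
        rw [List.count_eq_zero]
        simpa using h
      rw [this]
      push_cast; ring
  rw [hstep, PySem.List.foldl_add, PySem.Dict.items_counter, List.map_map]
  have hS := PySem.Set.nodup_ofList x
  have hsub : ((PySem.Set.ofList x).map
      ((fun (kv : Int × Int) => kv.2 - (ar.count kv.1 : Int)) ∘ fun k => (k, (x.count k : Int)))).sum
      = ((PySem.Set.ofList x).map (fun k => (x.count k : Int))).sum
        - ((PySem.Set.ofList x).map (fun k => (ar.count k : Int))).sum := by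
    rw [show ((fun (kv : Int × Int) => kv.2 - (ar.count kv.1 : Int)) ∘ fun k => (k, (x.count k : Int)))
        = (fun k => (x.count k : Int) - (ar.count k : Int)) from rfl]
    exact pv_sum_map_sub _ _ _
  rw [hsub, pv_sum_counts _ hS x, pv_sum_counts _ hS ar]
  have hx : x.countP (fun a => List.contains (PySem.Set.ofList x) a) = x.length := by
    rw [List.countP_eq_length]
    intro a ha
    simpa [PySem.Set.mem_ofList] using ha
  have har : ar.countP (fun a => List.contains (PySem.Set.ofList x) a)
      = ar.countP (fun a => x.contains a) := by
    apply List.countP_congr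
    intro a _
    simp [PySem.Set.mem_ofList]
  rw [hx, har]
  omega

-- ===== VERDICT (by name: the statement is the Claim_ definition above) =====
theorem Solution_spec : Claim_equal_Solution := by
  intro d ar _
  unfold Spec_Solution Solution Solution_alt
  rw [pv_d1_counter]
  dsimp only
  have houter := PySem.List.foldl_pyRange_pyGetD d ([] : List Int)
    (fun (retVal : List (List Int)) (x : List Int) =>
      if PySem.List.len x = PySem.List.len ar + 1 then
        let d2 : PySem.Dict Int Int :=
          (PySem.List.pyRange 0 (PySem.List.len x)).foldl (fun d2 j =>
            let e := PySem.List.pyGetD x j 0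
            if d2.contains e = false then d2.insert e 1
            else d2.insert e (d2.getD e 0 + 1)) PySem.Dict.empty
        let count : Int :=
          d2.items.foldl (fun count kv =>
            if (PySem.Dict.counter ar).contains kv.1 then
              let t := kv.2 - (PySem.Dict.counter ar).getD kv.1 0
              count + t
            else count + kv.2) 0
        if count = 1 then retVal ++ [x] else retVal
      else retVal) ([] : List (List Int)) (a := 0) le_rfl
  rw [houter]
  simp only [Int.toNat_zero, List.drop_zero]
  -- rewrite A's per-element body into B's boolean filter predicate, then fold = filter
  have hbody : (fun (retVal : List (List Int)) (x : List Int) =>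
      if PySem.List.len x = PySem.List.len ar + 1 then
        let d2 : PySem.Dict Int Int :=
          (PySem.List.pyRange 0 (PySem.List.len x)).foldl (fun d2 j =>
            let e := PySem.List.pyGetD x j 0
            if d2.contains e = false then d2.insert e 1
            else d2.insert e (d2.getD e 0 + 1)) PySem.Dict.empty
        let count : Int :=
          d2.items.foldl (fun count kv =>
            if (PySem.Dict.counter ar).contains kv.1 then
              let t := kv.2 - (PySem.Dict.counter ar).getD kv.1 0
              count + t
            else count + kv.2) 0
        if count = 1 then retVal ++ [x] else retVal
      else retVal) =
      (fun (retVal : List (List Int)) (x : List Int) =>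
        if (PySem.List.len x == PySem.List.len ar + 1
            && (PySem.Set.ofList ar).all (fun a => x.contains a)) = true
        then retVal ++ [id x] else retVal) := by
    funext retVal x
    by_cases hlen : PySem.List.len x = PySem.List.len ar + 1
    · rw [if_pos hlen]
      have hinner := PySem.List.foldl_pyRange_pyGetD x (0 : Int)
        (fun (d2 : PySem.Dict Int Int) (e : Int) =>
          if d2.contains e = false then d2.insert e 1
          else d2.insert e (d2.getD e 0 + 1)) PySem.Dict.empty (a := 0) le_rfl
      simp only [Int.toNat_zero, List.drop_zero] at hinner
      rw [show (PySem.List.pyRange 0 (PySem.List.len x)).foldl (fun d2 j =>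
            let e := PySem.List.pyGetD x j 0
            if d2.contains e = false then d2.insert e 1
            else d2.insert e (d2.getD e 0 + 1)) PySem.Dict.empty
          = PySem.Dict.counter x from hinner.trans (pv_d2_counter x)]
      dsimp only
      rw [pv_count_eq x ar]
      have hlen' : x.length = ar.length + 1 := by
        simp only [PySem.List.len] at hlen; omega
      have hle : ar.countP (fun a => x.contains a) ≤ ar.length := List.countP_le_length
      by_cases hsub : ∀ a ∈ ar, a ∈ x
      · have hcnt : ar.countP (fun a => x.contains a) = ar.length := by
          rw [List.countP_eq_length]
          intro a ha
          simpa [List.contains_iff_mem] using hsub a ha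
        have : (x.length : Int) - (ar.countP (fun a => x.contains a) : Int) = 1 := by
          rw [hcnt, hlen']; push_cast; ring
        rw [if_pos this]
        have hall : ((PySem.Set.ofList ar).all fun a => x.contains a) = true := by
          rw [List.all_eq_true]
          intro a ha
          simpa [List.contains_iff_mem] using hsub a ((PySem.Set.mem_ofList ar a).mp ha)
        have hbeq : (PySem.List.len x == PySem.List.len ar + 1
            && List.all (PySem.Set.ofList ar) fun a => x.contains a) = true := by
          rw [Bool.and_eq_true]
          exact ⟨by simpa using hlen, hall⟩
        rw [hbeq]
        simp
      · have hcnt : ar.countP (fun a => x.contains a) ≠ ar.length := by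
          intro h
          exact hsub (fun a ha => by
            have := List.countP_eq_length.mp h a ha
            simpa [List.contains_iff_mem] using this)
        have : (x.length : Int) - (ar.countP (fun a => x.contains a) : Int) ≠ 1 := by
          rw [hlen']; push_cast; omega
        rw [if_neg this]
        have hall : ((PySem.Set.ofList ar).all fun a => x.contains a) = false := by
          rw [List.all_eq_false]
          rw [not_forall] at hsub
          obtain ⟨a, hsub⟩ := hsub
          rw [not_forall] at hsub
          obtain ⟨ha, hax⟩ := Classical.not_imp.mp (by simpa using hsub)
          exact ⟨a, (PySem.Set.mem_ofList ar a).mpr ha, by simpa [List.contains_iff_mem] using hax⟩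
        have hbeq : (PySem.List.len x == PySem.List.len ar + 1
            && List.all (PySem.Set.ofList ar) fun a => x.contains a) = false := by
          rw [hall]; simp
        rw [hbeq]
        simp
    · rw [if_neg hlen]
      have hbeq : (PySem.List.len x == PySem.List.len ar + 1
          && List.all (PySem.Set.ofList ar) fun a => x.contains a) = false := by
        have h' : (PySem.List.len x == PySem.List.len ar + 1) = false := by simpa using hlen
        rw [h']; simp
      rw [hbeq]
      simp
  rw [hbody, PySem.List.foldl_append_if]
  simp
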